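-- pv_equiv track=rewrite | github.com/poovendhan-nandhu/Json-recontextualization | src/validators/scoped_validators.py | _check_klo_coverage
-- ===== SOURCE A (Python) =====
-- def _check_klo_coverage(klos: list[tuple[str, str]], questions: list[str]) -> dict:
--     """Check if each KLO is covered by at least one question."""
--     uncovered = []
--
--     for klo_id, klo_text in klos:
--         # Simple heuristic: check if key words from KLO appear in any question
--         klo_words = set(klo_text.lower().split())
--         klo_words -= {"the", "a", "an", "to", "and", "or", "of", "in", "for", "is", "are", "will", "be"}
--
--         covered = False
--         for q in questions:
--             q_words = set(q.lower().split())
--             overlap = klo_words & q_words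
--             if len(overlap) >= 2:  # At least 2 meaningful words overlap
--                 covered = True
--                 break
--
--         if not covered:
--             uncovered.append((klo_id, klo_text))
--
--     return {"uncovered": uncovered}
-- ===== SOURCE B (Python) =====
-- def _check_klo_coverage(klos: list[tuple[str, str]], questions: list[str]) -> dict:
--     """Check if each KLO is covered by at least one question (inverted-index version)."""
--     stop = {"the", "a", "an", "to", "and", "or", "of", "in", "for", "is", "are", "will", "be"}
--     # Inverted index: word -> list of indices of the questions containing it.
--     index = {}
--     for i, q in enumerate(questions):
--         for w in set(q.lower().split()):
--             index.setdefault(w, []).append(i)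
--     uncovered = []
--     for klo_id, klo_text in klos:
--         counts = {}
--         for w in set(klo_text.lower().split()) - stop:
--             for i in index.get(w, []):
--                 counts[i] = counts.get(i, 0) + 1
--         if not any(c >= 2 for c in counts.values()):
--             uncovered.append((klo_id, klo_text))
--     return {"uncovered": uncovered}
-- ===== Notes on version B (the rewrite author's own statement) =====
-- stated objective: faster
-- what changed: Replaces A's per-KLO rescan of every question (splitting each question once per KLO) by an inverted index from word to question indices built in one pass, so each KLO only tallies index hits of its own words in a counter and is covered iff some question index reaches count 2.
import Mathlib
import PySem

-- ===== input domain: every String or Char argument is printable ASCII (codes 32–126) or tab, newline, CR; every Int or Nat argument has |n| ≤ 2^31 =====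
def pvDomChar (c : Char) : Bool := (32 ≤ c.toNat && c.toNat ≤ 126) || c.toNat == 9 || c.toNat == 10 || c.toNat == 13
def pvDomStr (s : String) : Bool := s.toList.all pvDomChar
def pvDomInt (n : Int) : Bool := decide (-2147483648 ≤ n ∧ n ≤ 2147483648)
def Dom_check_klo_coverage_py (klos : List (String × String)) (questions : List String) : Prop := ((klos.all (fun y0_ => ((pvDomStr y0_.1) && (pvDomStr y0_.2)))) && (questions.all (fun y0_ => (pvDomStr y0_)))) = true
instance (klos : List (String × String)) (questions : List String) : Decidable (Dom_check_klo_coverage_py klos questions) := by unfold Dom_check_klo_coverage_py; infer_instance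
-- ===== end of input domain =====

-- B replaces A's nested scan over all questions per KLO by an inverted index (word → question
-- indices) built once, with a per-KLO counter over index hits; objective: faster.

-- shared vocabulary helpers (both Pythons compute set(s.lower().split()) and the stopword set)
def stopWords : List String :=
  ["the", "a", "an", "to", "and", "or", "of", "in", "for", "is", "are", "will", "be"]

def wordSet (s : String) : PySem.Set String :=
  PySem.Set.ofList (PySem.Str.split₀ (PySem.Str.lower s))

-- ===== PORT A =====
-- the inner 'for q in questions: … break' loop of A
def coveredA (kws : PySem.Set String) : List String → Bool
  | [] => false
  | q :: rest =>
      if 2 ≤ (PySem.Set.inter kws (wordSet q)).length then true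
      else coveredA kws rest

def check_klo_coverage_py (klos : List (String × String)) (questions : List String) : List (String × List (String × String)) :=
  let uncovered := klos.foldl (fun acc kl =>
    if coveredA (PySem.Set.diff (wordSet kl.2) stopWords) questions then acc
    else acc ++ [(kl.1, kl.2)]) []
  [("uncovered", uncovered)]

-- ===== PORT B =====
-- index.setdefault(w, []).append(i) over enumerate(questions)
def buildIndex (questions : List String) : PySem.Dict String (List Int) :=
  (PySem.List.enumerate questions).foldl (fun d p =>
    (wordSet p.2).foldl (fun d w => d.modify w [] (fun l => l ++ [p.1])) d)
    PySem.Dict.empty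

-- counts[i] = counts.get(i, 0) + 1 over the index hits of each meaningful KLO word
def kloCounts (index : PySem.Dict String (List Int)) (kws : PySem.Set String) : PySem.Dict Int Int :=
  kws.foldl (fun c w => (index.getD w []).foldl (fun c i => c.modify i 0 (· + 1)) c)
    PySem.Dict.empty

def check_klo_coverage_py_alt (klos : List (String × String)) (questions : List String) : List (String × List (String × String)) :=
  let index := buildIndex questions
  let uncovered := klos.foldl (fun acc kl =>
    if (kloCounts index (PySem.Set.diff (wordSet kl.2) stopWords)).values.any
        (fun c => decide (2 ≤ c)) then acc
    else acc ++ [(kl.1, kl.2)]) []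
  [("uncovered", uncovered)]

-- ===== PRECONDITION & SPEC =====
def Spec_check_klo_coverage_py (klos : List (String × String)) (questions : List String) (out : List (String × List (String × String))) : Prop := out = check_klo_coverage_py_alt klos questions
instance (klos : List (String × String)) (questions : List String) (out : List (String × List (String × String))) : Decidable (Spec_check_klo_coverage_py klos questions out) := by unfold Spec_check_klo_coverage_py; infer_instance

-- ===== CLAIM (what is proved, stated in full; the proofs are below) =====
def Claim_equal_check_klo_coverage_py : Prop := ∀ (klos : List (String × String)) (questions : List String), Dom_check_klo_coverage_py klos questions → Spec_check_klo_coverage_py klos questions (check_klo_coverage_py klos questions)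

-- ===== LEMMAS AND PROOFS =====

-- inner fold lemma
theorem inner_getD (ws : List String) (hnd : ws.Nodup) (i : Int) (d : PySem.Dict String (List Int)) (w : String) :
    (ws.foldl (fun d w' => d.modify w' [] (fun l => l ++ [i])) d).getD w [] =
      d.getD w [] ++ (if ws.contains w then [i] else []) := by
  have h1 : ws.foldl (fun d w' => d.modify w' [] (fun l => l ++ [i])) d
      = (ws.map (fun w' => (w', i))).foldl (fun d p => d.modify p.1 [] (fun l => l ++ [p.2])) d := by
    rw [List.foldl_map]
  rw [h1, PySem.Dict.getD_foldl_modify_append, List.filter_map]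
  have : (ws.filter ((fun p => p.1 == w) ∘ (fun w' => (w', i)))) = ws.filter (· == w) := rfl
  rw [this, List.map_map]
  have h2 : ws.filter (· == w) = if w ∈ ws then [w] else [] := by
    rw [List.filter_beq, List.Nodup.count hnd]
    split_ifs <;> simp
  rw [h2]
  split_ifs with h <;> simp_all

theorem build_gen (ps : List (Int × String)) (d : PySem.Dict String (List Int)) (w : String) :
    (ps.foldl (fun d p => (wordSet p.2).foldl (fun d w' => d.modify w' [] (fun l => l ++ [p.1])) d) d).getD w []
      = d.getD w [] ++ (ps.filter (fun p => (wordSet p.2).contains w)).map (·.1) := by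
  induction ps generalizing d with
  | nil => simp
  | cons p rest ih =>
      simp only [List.foldl_cons, ih, List.filter_cons]
      rw [inner_getD (wordSet p.2) (by unfold wordSet; exact PySem.Set.nodup_ofList _)]
      by_cases h : w ∈ wordSet p.2 <;> simp [h, List.append_assoc]

theorem counts_gen (index : PySem.Dict String (List Int)) (kws : List String)
    (c : PySem.Dict Int Int) (v : Int) :
    (kws.foldl (fun c w => (index.getD w []).foldl (fun c i => c.modify i 0 (· + 1)) c) c).getD v 0
      = c.getD v 0 + (kws.map (fun w => ((index.getD w []).count v : Int))).sum := by
  induction kws generalizing c with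
  | nil => simp
  | cons w rest ih =>
      simp only [List.foldl_cons, ih, PySem.Dict.getD_foldl_modify_add_one, List.map_cons,
        List.sum_cons]
      ring

theorem counts_nodup (index : PySem.Dict String (List Int)) (kws : List String)
    (c : PySem.Dict Int Int) (h : c.keys.Nodup) :
    (kws.foldl (fun c w => (index.getD w []).foldl (fun c i => c.modify i 0 (· + 1)) c) c).keys.Nodup := by
  induction kws generalizing c with
  | nil => exact h
  | cons w rest ih =>
      refine ih _ ?_
      exact PySem.Dict.nodup_keys_foldl_modify_key _ (fun i => i) 0 (fun _ _ => (· + 1)) _ h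

theorem mem_idx (qs : List String) (w : String) (v : Int) :
    v ∈ (((PySem.List.enumerate qs).filter (fun p => (wordSet p.2).contains w)).map (·.1)) ↔
      ∃ (k : Nat) (h : k < qs.length), v = k ∧ (wordSet qs[k]).contains w := by
  simp only [List.mem_map, List.mem_filter, PySem.List.mem_enumerate_iff]
  constructor
  · rintro ⟨p, ⟨⟨k, hk, rfl⟩, hw⟩, rfl⟩
    exact ⟨k, hk, by simp, hw⟩
  · rintro ⟨k, hk, rfl, hw⟩
    exact ⟨((k : Int), qs[k]), ⟨⟨k, hk, by simp⟩, hw⟩, rfl⟩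

theorem idx_nodup (qs : List String) (w : String) :
    (((PySem.List.enumerate qs).filter (fun p => (wordSet p.2).contains w)).map (·.1)).Nodup := by
  have h1 := PySem.List.pairwise_lt_enumerate qs 0
  have h2 := List.Pairwise.filter (fun p => (wordSet p.2).contains w) h1
  have h3 : List.Pairwise (fun (a b : Int) => a < b)
      (((PySem.List.enumerate qs).filter (fun p => (wordSet p.2).contains w)).map (·.1)) :=
    List.Pairwise.map _ (fun _ _ hab => hab) h2
  exact h3.imp (fun {a b} (hab : a < b) => ne_of_lt hab)

theorem coveredA_eq_any (kws : PySem.Set String) (qs : List String) :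
    coveredA kws qs = qs.any (fun q => decide (2 ≤ (PySem.Set.inter kws (wordSet q)).length)) := by
  induction qs with
  | nil => rfl
  | cons q rest ih =>
      simp only [coveredA, List.any_cons, ← ih]
      split_ifs with h <;> simp [h]

theorem buildIndex_getD (qs : List String) (w : String) :
    (buildIndex qs).getD w [] =
      ((PySem.List.enumerate qs).filter (fun p => (wordSet p.2).contains w)).map (·.1) := by
  unfold buildIndex
  rw [build_gen]
  simp

theorem inter_len (kws : PySem.Set String) (q : String) :
    (PySem.Set.inter kws (wordSet q)).length = kws.countP (fun x => (wordSet q).contains x) := by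
  unfold PySem.Set.inter
  exact List.countP_eq_length_filter.symm

theorem covered_eq (kws : PySem.Set String) (qs : List String) :
    (kloCounts (buildIndex qs) kws).values.any (fun c => decide (2 ≤ c)) = coveredA kws qs := by
  rw [coveredA_eq_any]
  have hnd : (kloCounts (buildIndex qs) kws).keys.Nodup := by
    unfold kloCounts
    exact counts_nodup _ _ _ (by simp)
  have hget : ∀ v : Int, (kloCounts (buildIndex qs) kws).getD v 0 =
      (kws.map (fun w =>
        (((((PySem.List.enumerate qs).filter (fun p => (wordSet p.2).contains w)).map (·.1)).count v : Nat) : Int))).sum := by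
    intro v
    unfold kloCounts
    rw [counts_gen]
    simp [buildIndex_getD]
  have hS : ∀ (k : Nat) (hk : k < qs.length),
      (kloCounts (buildIndex qs) kws).getD (k : Int) 0 =
        ((kws.countP (fun w => (wordSet (qs[k]'hk)).contains w) : Nat) : Int) := by
    intro k hk
    rw [hget]
    have : ∀ w ∈ kws,
        ((((((PySem.List.enumerate qs).filter (fun p => (wordSet p.2).contains w)).map (·.1)).count ((k : Int)) : Nat) : Int))
          = (if (wordSet (qs[k]'hk)).contains w then 1 else 0) := by
      intro w _
      rw [List.Nodup.count (idx_nodup qs w)]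
      by_cases hmem : ((k:Int)) ∈ (((PySem.List.enumerate qs).filter (fun p => (wordSet p.2).contains w)).map (·.1))
      · obtain ⟨k', hk', hkk, hw⟩ := (mem_idx qs w _).mp hmem
        have : k' = k := by exact_mod_cast hkk.symm
        subst this
        rw [if_pos hmem, if_pos hw, Nat.cast_one]
      · have hw : ¬ (wordSet (qs[k]'hk)).contains w = true := by
          intro hw
          exact hmem ((mem_idx qs w _).mpr ⟨k, hk, rfl, hw⟩)
        rw [if_neg hmem, if_neg hw, Nat.cast_zero]
    rw [List.map_congr_left this]
    rw [PySem.List.sum_map_ite_one_zero]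
  have hS0 : ∀ v : Int, ¬(0 ≤ v ∧ v.toNat < qs.length) →
      (kloCounts (buildIndex qs) kws).getD v 0 = 0 := by
    intro v hv
    rw [hget]
    have : ∀ w ∈ kws,
        ((((((PySem.List.enumerate qs).filter (fun p => (wordSet p.2).contains w)).map (·.1)).count v : Nat) : Int)) = 0 := by
      intro w _
      rw [List.Nodup.count (idx_nodup qs w)]
      have : ¬ v ∈ (((PySem.List.enumerate qs).filter (fun p => (wordSet p.2).contains w)).map (·.1)) := by
        intro hmem
        obtain ⟨k', hk', hkk, hw⟩ := (mem_idx qs w _).mp hmem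
        subst hkk
        exact hv ⟨by positivity, by simpa using hk'⟩
      rw [if_neg this, Nat.cast_zero]
    refine List.sum_eq_zero ?_
    intro x hx
    obtain ⟨w, hw, rfl⟩ := List.mem_map.mp hx
    exact this w hw
  rw [Bool.eq_iff_iff]
  simp only [List.any_eq_true, decide_eq_true_eq]
  constructor
  · rintro ⟨c, hc, h2⟩
    rw [PySem.Dict.values_eq_map_keys _ hnd 0] at hc
    obtain ⟨v, hv, rfl⟩ := List.mem_map.mp hc
    by_cases hrange : 0 ≤ v ∧ v.toNat < qs.length
    · have hv2 : ((v.toNat : Int)) = v := Int.toNat_of_nonneg hrange.1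
      refine ⟨qs[v.toNat]'hrange.2, List.getElem_mem _, ?_⟩
      rw [inter_len]
      have := hS v.toNat hrange.2
      rw [hv2] at this
      rw [this] at h2
      exact_mod_cast h2
    · rw [hS0 v hrange] at h2
      omega
  · rintro ⟨q, hq, h2⟩
    obtain ⟨k, hk, rfl⟩ := List.mem_iff_getElem.mp hq
    have hS2 := hS k hk
    have hval : 2 ≤ (kloCounts (buildIndex qs) kws).getD (k : Int) 0 := by
      rw [hS2]
      rw [inter_len] at h2
      exact_mod_cast h2
    have hkey : (k : Int) ∈ (kloCounts (buildIndex qs) kws).keys := by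
      by_contra hno
      have hcon : (kloCounts (buildIndex qs) kws).contains ((k : Int)) = false := by
        rcases Bool.eq_false_or_eq_true ((kloCounts (buildIndex qs) kws).contains ((k : Int))) with h | h
        · exact absurd ((PySem.Dict.contains_iff_mem_keys _ _).mp h) hno
        · exact h
      rw [PySem.Dict.getD_of_not_contains _ _ hcon] at hval
      omega
    refine ⟨(kloCounts (buildIndex qs) kws).getD ((k : Int)) 0, ?_, hval⟩
    rw [PySem.Dict.values_eq_map_keys _ hnd 0]
    exact List.mem_map.mpr ⟨(k : Int), hkey, rfl⟩

-- ===== VERDICT (by name: the statement is the Claim_ definition above) =====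
theorem check_klo_coverage_py_spec : Claim_equal_check_klo_coverage_py := by
  intro klos questions _
  unfold Spec_check_klo_coverage_py check_klo_coverage_py check_klo_coverage_py_alt
  rw [PySem.List.foldl_congr_mem (g := fun acc kl =>
    if (kloCounts (buildIndex questions) (PySem.Set.diff (wordSet kl.2) stopWords)).values.any
        (fun c => decide (2 ≤ c)) then acc else acc ++ [(kl.1, kl.2)])]
  intro acc kl _
  rw [covered_eq]
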